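-- pv_equiv track=rewrite | github.com/luisfernandomansilla/content | src/content_creator/models/huggingface_client.py | _estimate_memory_requirement
-- ===== SOURCE A (Python) =====
-- from typing import Dict, List, Any, Optional, Tuple
--
-- def _estimate_memory_requirement(model_id: str, tags: List[str]) -> str:
--     """Estimate memory requirements based on model info"""
--     model_id_lower = model_id.lower()
--
--     # High memory models
--     if any(keyword in model_id_lower for keyword in ['xl', 'large', 'videocrafter']):
--         return '16GB'
--     # Medium-high memory models
--     elif any(keyword in model_id_lower for keyword in ['stable-video-diffusion', 'i2vgen']):
--         return '12GB'
--     # Medium memory models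
--     elif any(keyword in model_id_lower for keyword in ['animatediff', 'lavie']):
--         return '8GB'
--     # Lower memory models
--     else:
--         return '6GB'
-- ===== SOURCE B (Python) =====
-- _KEYWORD_GB = {
--     'xl': 16, 'large': 16, 'videocrafter': 16,
--     'stable-video-diffusion': 12, 'i2vgen': 12,
--     'animatediff': 8, 'lavie': 8,
-- }
--
-- def _estimate_memory_requirement(model_id, tags):
--     m = model_id.lower()
--     best = max((gb for kw, gb in _KEYWORD_GB.items() if kw in m), default=6)
--     return f"{best}GB"
-- ===== Notes on version B (the rewrite author's own statement) =====
-- stated objective: alternative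
-- what changed: Replaces the ordered if/elif priority cascade by an unordered max-aggregation: each keyword is mapped to a numeric GB tier, the maximum tier among matched keywords (default 6) is computed and formatted; correct because A's branch priority coincides with descending memory size.
import Mathlib
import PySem

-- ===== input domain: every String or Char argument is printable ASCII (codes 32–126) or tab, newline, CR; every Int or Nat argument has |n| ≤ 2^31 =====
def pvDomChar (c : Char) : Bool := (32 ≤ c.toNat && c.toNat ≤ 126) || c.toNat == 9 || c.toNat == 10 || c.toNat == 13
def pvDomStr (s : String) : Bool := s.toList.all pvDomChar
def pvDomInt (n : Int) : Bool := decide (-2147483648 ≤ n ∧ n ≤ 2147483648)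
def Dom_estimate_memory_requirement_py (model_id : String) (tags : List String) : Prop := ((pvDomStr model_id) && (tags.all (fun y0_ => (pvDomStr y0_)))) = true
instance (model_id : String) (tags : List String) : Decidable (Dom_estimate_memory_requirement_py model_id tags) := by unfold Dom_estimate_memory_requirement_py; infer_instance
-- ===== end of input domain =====

-- B replaces A's ordered if/elif cascade by a max-aggregation over a keyword→GB-tier map (alternative decomposition, same cost).


-- ===== PORT A =====
-- Port of A: if/elif cascade over `any` keyword membership tests.
def estimate_memory_requirement_py (model_id : String) (tags : List String) : String :=
  let model_id_lower := PySem.Str.lower model_id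
  if ["xl", "large", "videocrafter"].any (fun k => PySem.Str.isIn k model_id_lower) then "16GB"
  else if ["stable-video-diffusion", "i2vgen"].any (fun k => PySem.Str.isIn k model_id_lower) then "12GB"
  else if ["animatediff", "lavie"].any (fun k => PySem.Str.isIn k model_id_lower) then "8GB"
  else "6GB"

-- ===== PORT B =====
-- Port of B: keyword → GB-tier map; max matched tier (default 6), then format "<n>GB".
def pvKeywordGB : List (String × Int) :=
  [("xl", 16), ("large", 16), ("videocrafter", 16),
   ("stable-video-diffusion", 12), ("i2vgen", 12),
   ("animatediff", 8), ("lavie", 8)]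

def estimate_memory_requirement_py_alt (model_id : String) (tags : List String) : String :=
  let m := PySem.Str.lower model_id
  let matched := (pvKeywordGB.filter (fun p => PySem.Str.isIn p.1 m)).map Prod.snd
  let best : Int := match PySem.List.max? matched (fun x => x) with
    | some v => v
    | none => 6
  PySem.Int.toStr best ++ "GB"

-- ===== PRECONDITION & SPEC =====
def Spec_estimate_memory_requirement_py (model_id : String) (tags : List String) (out : String) : Prop := out = estimate_memory_requirement_py_alt model_id tags
instance (model_id : String) (tags : List String) (out : String) : Decidable (Spec_estimate_memory_requirement_py model_id tags out) := by unfold Spec_estimate_memory_requirement_py; infer_instance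

-- ===== CLAIM (what is proved, stated in full; the proofs are below) =====
def Claim_equal_estimate_memory_requirement_py : Prop := ∀ (model_id : String) (tags : List String), Dom_estimate_memory_requirement_py model_id tags → Spec_estimate_memory_requirement_py model_id tags (estimate_memory_requirement_py model_id tags)

-- ===== LEMMAS AND PROOFS =====

-- ===== VERDICT (by name: the statement is the Claim_ definition above) =====
theorem estimate_memory_requirement_py_spec : Claim_equal_estimate_memory_requirement_py := by
  intro model_id tags _
  unfold Spec_estimate_memory_requirement_py estimate_memory_requirement_py
    estimate_memory_requirement_py_alt pvKeywordGB
  set m := PySem.Str.lower model_id with hm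
  simp only [List.any_cons, List.any_nil, Bool.or_false, List.filter_cons, List.filter_nil]
  generalize PySem.Str.isIn "xl" m = b1
  generalize PySem.Str.isIn "large" m = b2
  generalize PySem.Str.isIn "videocrafter" m = b3
  generalize PySem.Str.isIn "stable-video-diffusion" m = b4
  generalize PySem.Str.isIn "i2vgen" m = b5
  generalize PySem.Str.isIn "animatediff" m = b6
  generalize PySem.Str.isIn "lavie" m = b7
  revert b1 b2 b3 b4 b5 b6 b7
  decide
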